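-- pv_equiv track=rewrite | github.com/ProvLeon/local_dialect_speech_model | src/utils/backfill_sample_copies.py | normalize_intent
-- ===== SOURCE A (Python) =====
-- def normalize_intent(verbose_intent: str) -> str:
--     """
--     Extract canonical intent from verbose old intent names.
--
--     Pattern: <canonical_intent>_<first_word>_<maybe_more>
--     Examples:
--         add_address_Fa_address -> add_address
--         apply_filter_Fa_filter_fa -> apply_filter
--         cancel_order_Gyae_order -> cancel_order
--     """
--     # Known canonical intents from prompts_lean.csv (hardcoded for robustness)
--     canonical_intents = {
--         'add_address', 'add_to_cart', 'apply_coupon', 'apply_filter',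
--         'cancel_order', 'change_color', 'change_quantity', 'change_size',
--         'checkout', 'clear_cart', 'clear_filter', 'confirm_order', 'continue',
--         'disable_order_updates', 'disable_price_alert', 'enable_order_updates',
--         'enable_price_alert', 'exchange_item', 'go_back', 'go_home', 'help',
--         'make_payment', 'order_not_arrived', 'refund_status', 'remove_address',
--         'remove_coupon', 'remove_from_cart', 'save_for_later', 'select_color',
--         'select_size', 'set_default_address', 'show_cart', 'show_description',
--         'sort_items', 'start_live_chat', 'track_order'
--     }
--
--     # Try progressively shorter prefixes
--     parts = verbose_intent.split('_')
--     for i in range(len(parts), 0, -1):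
--         candidate = '_'.join(parts[:i])
--         if candidate in canonical_intents:
--             return candidate
--
--     # Fallback: return original
--     return verbose_intent
-- ===== SOURCE B (Python) =====
-- CANONICAL_INTENTS = (
--     'add_address', 'add_to_cart', 'apply_coupon', 'apply_filter',
--     'cancel_order', 'change_color', 'change_quantity', 'change_size',
--     'checkout', 'clear_cart', 'clear_filter', 'confirm_order', 'continue',
--     'disable_order_updates', 'disable_price_alert', 'enable_order_updates',
--     'enable_price_alert', 'exchange_item', 'go_back', 'go_home', 'help',
--     'make_payment', 'order_not_arrived', 'refund_status', 'remove_address',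
--     'remove_coupon', 'remove_from_cart', 'save_for_later', 'select_color',
--     'select_size', 'set_default_address', 'show_cart', 'show_description',
--     'sort_items', 'start_live_chat', 'track_order'
-- )
--
--
-- def normalize_intent(verbose_intent: str) -> str:
--     """Scan the known canonical intents and keep the longest one that is a
--     part-aligned prefix of verbose_intent (equal, or followed by an underscore)."""
--     best = None
--     for c in CANONICAL_INTENTS:
--         if verbose_intent == c or verbose_intent.startswith(c + '_'):
--             if best is None or len(c) > len(best):
--                 best = c
--     return best if best is not None else verbose_intent
-- ===== Notes on version B (the rewrite author's own statement) =====
-- stated objective: alternative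
-- what changed: Instead of splitting the input on underscores and testing progressively shorter rebuilt prefixes for set membership, B scans the fixed canonical-intent list once and keeps the longest canonical c that equals the input or is followed by an underscore in it, falling back to the input if none matches.
import Mathlib
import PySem

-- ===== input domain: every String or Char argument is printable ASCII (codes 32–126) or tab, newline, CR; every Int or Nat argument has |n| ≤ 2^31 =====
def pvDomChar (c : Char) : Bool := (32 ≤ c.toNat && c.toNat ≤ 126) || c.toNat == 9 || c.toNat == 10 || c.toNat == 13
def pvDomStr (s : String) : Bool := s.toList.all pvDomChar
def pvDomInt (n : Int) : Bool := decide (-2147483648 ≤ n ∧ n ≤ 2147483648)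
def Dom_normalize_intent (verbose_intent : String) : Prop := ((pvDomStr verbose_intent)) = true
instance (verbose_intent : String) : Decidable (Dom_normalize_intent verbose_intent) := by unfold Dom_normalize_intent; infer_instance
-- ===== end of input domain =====

-- B replaces A's "rebuild every '_'-prefix of the input and test set membership" by a single
-- scan of the canonical-intent list keeping the longest part-aligned-prefix match (objective: alternative).

-- ===== PORT A =====
-- the set literal of canonical intents, in source order
def pvCanonSetA : PySem.Set String := PySem.Set.ofList
  ["add_address", "add_to_cart", "apply_coupon", "apply_filter",
   "cancel_order", "change_color", "change_quantity", "change_size",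
   "checkout", "clear_cart", "clear_filter", "confirm_order", "continue",
   "disable_order_updates", "disable_price_alert", "enable_order_updates",
   "enable_price_alert", "exchange_item", "go_back", "go_home", "help",
   "make_payment", "order_not_arrived", "refund_status", "remove_address",
   "remove_coupon", "remove_from_cart", "save_for_later", "select_color",
   "select_size", "set_default_address", "show_cart", "show_description",
   "sort_items", "start_live_chat", "track_order"]

-- the 'for i in range(len(parts), 0, -1): … return candidate' loop (early return = Option)
def pvLoopA (parts : List String) : List Int → Option String
  | [] => none
  | i :: is =>
    let candidate := PySem.Str.join "_" (PySem.List.slice parts none (some i))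
    if PySem.Set.contains pvCanonSetA candidate then some candidate else pvLoopA parts is

def normalize_intent (verbose_intent : String) : String :=
  let parts := (PySem.Str.split? verbose_intent "_").getD []
  (pvLoopA parts (PySem.List.pyRange (PySem.List.len parts) 0 (-1))).getD verbose_intent

-- ===== PORT B =====
def pvCanonListB : List String :=
  ["add_address", "add_to_cart", "apply_coupon", "apply_filter",
   "cancel_order", "change_color", "change_quantity", "change_size",
   "checkout", "clear_cart", "clear_filter", "confirm_order", "continue",
   "disable_order_updates", "disable_price_alert", "enable_order_updates",
   "enable_price_alert", "exchange_item", "go_back", "go_home", "help",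
   "make_payment", "order_not_arrived", "refund_status", "remove_address",
   "remove_coupon", "remove_from_cart", "save_for_later", "select_color",
   "select_size", "set_default_address", "show_cart", "show_description",
   "sort_items", "start_live_chat", "track_order"]

def normalize_intent_alt (verbose_intent : String) : String :=
  (pvCanonListB.foldl
    (fun best c =>
      if verbose_intent == c || PySem.Str.startswith verbose_intent (c ++ "_") then
        match best with
        | none => some c
        | some b => if PySem.Str.len c > PySem.Str.len b then some c else best
      else best)
    none).getD verbose_intent

-- ===== PRECONDITION & SPEC =====
def Spec_normalize_intent (verbose_intent : String) (out : String) : Prop := out = normalize_intent_alt verbose_intent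
instance (verbose_intent : String) (out : String) : Decidable (Spec_normalize_intent verbose_intent out) := by unfold Spec_normalize_intent; infer_instance

-- ===== CLAIM (what is proved, stated in full; the proofs are below) =====
def Claim_equal_normalize_intent : Prop := ∀ (verbose_intent : String), Dom_normalize_intent verbose_intent → Spec_normalize_intent verbose_intent (normalize_intent verbose_intent)

-- ===== LEMMAS AND PROOFS =====

-- char-level model of s.split('_')
def pvSplitU : List Char → List Char × List (List Char)
  | [] => ([], [])
  | c :: cs =>
    let r := pvSplitU cs
    if c = '_' then ([], r.1 :: r.2) else (c :: r.1, r.2)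

def pvParts (t : List Char) : List (List Char) := (pvSplitU t).1 :: (pvSplitU t).2

-- char-level model of '_'.join
def pvJoinU : List (List Char) → List Char
  | [] => []
  | [q] => q
  | q :: qs => q ++ '_' :: pvJoinU qs

def pvCC : List (List Char) := pvCanonListB.map String.toList

-- c is a part-aligned prefix of t
def pvAligned (c t : List Char) : Prop := c = t ∨ (c ++ ['_']) <+: t

def pvCand (qs : List (List Char)) (j : Nat) : List Char := pvJoinU (qs.take j)

-- char-level version of A's descending scan
def pvFA (qs : List (List Char)) : Nat → Option (List Char)
  | 0 => none
  | i + 1 => if pvCand qs (i + 1) ∈ pvCC then some (pvCand qs (i + 1)) else pvFA qs i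

-- char-level version of B's match test and fold step
def pvTestB (t c : List Char) : Bool := t == c || PySem.Chars.startswith t (c ++ ['_'])

def pvStepB (t : List Char) (best : Option (List Char)) (c : List Char) : Option (List Char) :=
  if pvTestB t c then
    match best with
    | none => some c
    | some b => if c.length > b.length then some c else best
  else best

-- ---- split bridge ----

theorem go_spec : ∀ (fuel : Nat) (s : List Char), s.length < fuel → ∀ (cur : List Char) (acc : List (List Char)),
    PySem.Chars.splitOn.go ['_'] fuel s cur acc
      = acc.reverse ++ (cur.reverse ++ (pvSplitU s).1) :: (pvSplitU s).2 := by
  intro fuel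
  induction fuel with
  | zero => intro s h; omega
  | succ n ih =>
    intro s h cur acc
    cases s with
    | nil => simp [PySem.Chars.splitOn.go, pvSplitU]
    | cons c rest =>
      rw [PySem.Chars.splitOn.go]
      by_cases hc : c = '_'
      · subst hc
        simp only [List.isPrefixOf, BEq.rfl, Bool.and_eq_true, and_self, if_true,
          List.drop_succ_cons, List.drop_zero, List.length_singleton]
        rw [ih rest (by simpa using Nat.lt_of_succ_lt_succ h) [] (cur.reverse :: acc)]
        simp [pvSplitU]
      · have hpre : (['_'].isPrefixOf (c :: rest)) = false := by
          simp [List.isPrefixOf]; exact fun hh => (hc hh.symm).elim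
        simp only [hpre, Bool.false_eq_true, if_false]
        rw [ih rest (by simpa using Nat.lt_of_succ_lt_succ h) (c :: cur) acc]
        simp [pvSplitU, hc]

theorem splitOn_us (s : List Char) : PySem.Chars.splitOn s ['_'] = pvParts s := by
  unfold PySem.Chars.splitOn
  rw [go_spec (s.length + 1) s (by omega) [] []]
  simp [pvParts]

-- ---- join facts ----

theorem joinU_eq_join (ps : List (List Char)) : PySem.Chars.join ['_'] ps = pvJoinU ps := by
  induction ps with
  | nil => simp [PySem.Chars.join, pvJoinU, List.intercalate]
  | cons q qs ih =>
    cases qs with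
    | nil => simp [PySem.Chars.join, pvJoinU, List.intercalate]
    | cons r rs =>
      simp only [pvJoinU]
      rw [← ih]
      simp [PySem.Chars.join, List.intercalate, List.intersperse]

theorem joinU_cons_first (c : Char) (p : List Char) (ps : List (List Char)) :
    pvJoinU ((c :: p) :: ps) = c :: pvJoinU (p :: ps) := by
  cases ps <;> simp [pvJoinU]

theorem joinU_cons_nil (ps : List (List Char)) (h : ps ≠ []) :
    pvJoinU ([] :: ps) = '_' :: pvJoinU ps := by
  cases ps with
  | nil => exact absurd rfl h
  | cons q qs => simp [pvJoinU]

theorem joinU_cons_ne (q : List Char) (ps : List (List Char)) (h : ps ≠ []) :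
    pvJoinU (q :: ps) = q ++ '_' :: pvJoinU ps := by
  cases ps with
  | nil => exact absurd rfl h
  | cons r rs => simp [pvJoinU]

theorem joinU_first_prefix (q : List Char) (ps : List (List Char)) : q <+: pvJoinU (q :: ps) := by
  cases ps with
  | nil => simp [pvJoinU]
  | cons r rs => simp [pvJoinU]

-- ---- split/join roundtrip ----

theorem splitU_us (cs : List Char) :
    pvSplitU ('_' :: cs) = ([], (pvSplitU cs).1 :: (pvSplitU cs).2) := by simp [pvSplitU]

theorem splitU_ne (c : Char) (cs : List Char) (hc : c ≠ '_') :
    pvSplitU (c :: cs) = (c :: (pvSplitU cs).1, (pvSplitU cs).2) := by simp [pvSplitU, hc]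

theorem parts_join (t : List Char) : pvJoinU (pvParts t) = t := by
  induction t with
  | nil => simp [pvParts, pvSplitU, pvJoinU]
  | cons c cs ih =>
    by_cases hc : c = '_'
    · subst hc
      simp only [pvParts, splitU_us]
      rw [joinU_cons_nil _ (by simp)]
      show '_' :: pvJoinU (pvParts cs) = _
      rw [ih]
    · simp only [pvParts, splitU_ne c cs hc]
      rw [joinU_cons_first]
      show c :: pvJoinU (pvParts cs) = _
      rw [ih]

theorem parts_no_us (t : List Char) : ∀ p ∈ pvParts t, '_' ∉ p := by
  induction t with
  | nil => simp [pvParts, pvSplitU]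
  | cons c cs ih =>
    intro p hp
    by_cases hc : c = '_'
    · subst hc
      simp only [pvParts, splitU_us, List.mem_cons] at hp
      rcases hp with h | h | h
      · simp [h]
      · exact ih _ (by simp [pvParts, h])
      · exact ih _ (by simp only [pvParts, List.mem_cons]; right; exact h)
    · simp only [pvParts, splitU_ne c cs hc, List.mem_cons] at hp
      rcases hp with h | h
      · subst h
        intro hm
        rcases List.mem_cons.mp hm with h | h
        · exact hc h.symm
        · exact ih _ (by simp [pvParts]) h
      · exact ih _ (by simp only [pvParts, List.mem_cons]; right; exact h)

-- ---- aligned prefixes are exactly the candidates ----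

theorem aligned_lift {c t : List Char} (x : List Char) (h : pvAligned c t) :
    pvAligned (x ++ '_' :: c) (x ++ '_' :: t) := by
  rcases h with h | h
  · exact Or.inl (by rw [h])
  · right
    have : (x ++ '_' :: c) ++ ['_'] = x ++ '_' :: (c ++ ['_']) := by simp
    rw [this]
    exact (List.prefix_append_right_inj x).mpr ((List.prefix_cons_inj '_').mpr h)

theorem aligned_cand : ∀ (qs : List (List Char)) (i : Nat), 1 ≤ i → i ≤ qs.length →
    pvAligned (pvCand qs i) (pvJoinU qs) := by
  intro qs
  induction qs with
  | nil => intro i h1 h2; simp at h2; omega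
  | cons q qs ih =>
    intro i h1 h2
    match i, h1 with
    | 1, _ =>
      cases qs with
      | nil => exact Or.inl rfl
      | cons r rs =>
        simp only [pvCand, List.take_succ_cons, List.take_zero]
        right
        rw [joinU_cons_ne q (r :: rs) (by simp)]
        show pvJoinU [q] ++ ['_'] <+: _
        simp [pvJoinU]
    | (i' + 2), _ =>
      have hqs : qs ≠ [] := by
        intro h; subst h; simp at h2
      have htake : qs.take (i' + 1) ≠ [] := by
        cases qs with
        | nil => exact absurd rfl hqs
        | cons r rs => simp
      have : pvCand (q :: qs) (i' + 2) = q ++ '_' :: pvCand qs (i' + 1) := by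
        simp only [pvCand, List.take_succ_cons]
        exact joinU_cons_ne q _ htake
      rw [this, joinU_cons_ne q qs hqs]
      exact aligned_lift q (ih (i' + 1) (by omega) (by simpa using h2))

theorem cand_mono : ∀ (qs : List (List Char)) (i j : Nat), i ≤ j → j ≤ qs.length →
    pvCand qs i <+: pvCand qs j := by
  intro qs
  induction qs with
  | nil =>
    intro i j hij hj
    simp at hj
    have hi : i = 0 := by omega
    subst hj; subst hi
    exact List.prefix_refl _
  | cons q qs ih =>
    intro i j hij hj
    cases i with
    | zero => simp [pvCand, pvJoinU]
    | succ i' =>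
      cases j with
      | zero => omega
      | succ j' =>
        cases i' with
        | zero =>
          have : pvCand (q :: qs) 1 = q := by simp [pvCand, pvJoinU]
          rw [this]
          simp only [pvCand, List.take_succ_cons]
          exact joinU_first_prefix q _
        | succ i'' =>
          have hqs : qs ≠ [] := by
            intro h; subst h; simp at hj; omega
          have ht1 : qs.take (i'' + 1) ≠ [] := by
            cases qs with | nil => exact absurd rfl hqs | cons r rs => simp
          have ht2 : qs.take j' ≠ [] := by
            cases qs with
            | nil => exact absurd rfl hqs
            | cons r rs => cases j' with | zero => omega | succ _ => simp
          simp only [pvCand, List.take_succ_cons]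
          rw [joinU_cons_ne q _ ht1, joinU_cons_ne q _ ht2]
          refine (List.prefix_append_right_inj q).mpr ((List.prefix_cons_inj '_').mpr ?_)
          exact ih (i'' + 1) j' (by omega) (by simpa using hj)

theorem cand_of_aligned (c : List Char) (qs : List (List Char)) (hq : qs ≠ [])
    (hus : ∀ p ∈ qs, '_' ∉ p) (hal : pvAligned c (pvJoinU qs)) :
    ∃ i, 1 ≤ i ∧ i ≤ qs.length ∧ c = pvCand qs i := by
  by_cases heq : c = pvJoinU qs
  · refine ⟨qs.length, ?_, le_refl _, ?_⟩
    · cases qs with | nil => exact absurd rfl hq | cons _ _ => simp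
    · rw [heq]; simp [pvCand]
  rcases hal with h | hpre
  · exact absurd h heq
  cases qs with
  | nil => exact absurd rfl hq
  | cons q rest =>
    cases q with
    | nil =>
      cases rest with
      | nil =>
        exfalso
        have := hpre.length_le
        simp [pvJoinU] at this
      | cons r rs =>
        rw [joinU_cons_nil (r :: rs) (by simp)] at hpre
        cases c with
        | nil =>
          exact ⟨1, le_refl _, by simp, by simp [pvCand, pvJoinU]⟩
        | cons x c' =>
          have hx : x = '_' ∧ c' ++ ['_'] <+: pvJoinU (r :: rs) := by
            have := hpre
            rw [List.cons_append] at this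
            exact ⟨(List.cons_prefix_cons.mp this).1, (List.cons_prefix_cons.mp this).2⟩
          obtain ⟨hxe, hx2⟩ := hx
          subst hxe
          obtain ⟨i', hi1, hi2, hc'⟩ := cand_of_aligned c' (r :: rs) (by simp)
            (fun p hp => hus p (List.mem_cons_of_mem _ hp)) (Or.inr hx2)
          have htne : (r :: rs).take i' ≠ [] := by
            cases i' with | zero => omega | succ _ => simp
          refine ⟨i' + 1, by omega, by simpa using Nat.succ_le_succ hi2, ?_⟩
          simp only [pvCand, List.take_succ_cons] at hc' ⊢
          rw [joinU_cons_nil _ htne, ← hc']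
    | cons a qh =>
      rw [joinU_cons_first] at hpre
      cases c with
      | nil =>
        exfalso
        simp only [List.nil_append] at hpre
        have := (List.cons_prefix_cons.mp hpre).1
        exact (hus (a :: qh) (by simp) (by rw [← this]; simp))
      | cons x c' =>
        rw [List.cons_append] at hpre
        have hx := List.cons_prefix_cons.mp hpre
        have hal' : pvAligned c' (pvJoinU (qh :: rest)) := Or.inr hx.2
        have hus' : ∀ p ∈ qh :: rest, '_' ∉ p := by
          intro p hp
          rcases List.mem_cons.mp hp with h | h
          · intro hm; exact hus (a :: qh) (by simp) (List.mem_cons_of_mem _ (h ▸ hm))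
          · exact hus p (List.mem_cons_of_mem _ h)
        obtain ⟨i, hi1, hi2, hc'⟩ := cand_of_aligned c' (qh :: rest) (by simp) hus' hal'
        refine ⟨i, hi1, by simpa using hi2, ?_⟩
        match i, hi1 with
        | (j + 1), _ =>
          simp only [pvCand, List.take_succ_cons] at hc' ⊢
          rw [joinU_cons_first, ← hc', hx.1]
termination_by c.length
decreasing_by all_goals (subst_vars; simp only [List.length_cons]; omega)

theorem aligned_prefix {c t : List Char} (h : pvAligned c t) : c <+: t := by
  rcases h with h | h
  · exact h ▸ List.prefix_refl c
  · exact ((List.prefix_append c ['_']).trans h)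

theorem aligned_length_eq {c d t : List Char} (hc : pvAligned c t) (hd : pvAligned d t)
    (h : c.length = d.length) : c = d := by
  have h1 := List.prefix_iff_eq_take.mp (aligned_prefix hc)
  have h2 := List.prefix_iff_eq_take.mp (aligned_prefix hd)
  rw [h1, h2, h]

-- ---- A's scan: characterization ----

def pvGood (t c : List Char) : Prop := c ∈ pvCC ∧ pvAligned c t

theorem fA_scan (qs : List (List Char)) : ∀ i : Nat,
    (∀ c, pvFA qs i = some c → ∃ j, 1 ≤ j ∧ j ≤ i ∧ c = pvCand qs j ∧ c ∈ pvCC ∧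
        ∀ k, j < k → k ≤ i → pvCand qs k ∉ pvCC) ∧
    (pvFA qs i = none → ∀ j, 1 ≤ j → j ≤ i → pvCand qs j ∉ pvCC) := by
  intro i
  induction i with
  | zero => exact ⟨fun c h => by simp [pvFA] at h, fun _ j h1 h2 => by omega⟩
  | succ i ih =>
    constructor
    · intro c hc
      by_cases hmem : pvCand qs (i + 1) ∈ pvCC
      · simp only [pvFA, if_pos hmem, Option.some.injEq] at hc
        exact ⟨i + 1, by omega, le_refl _, hc.symm, hc ▸ hmem, fun k h1 h2 => by omega⟩
      · simp only [pvFA, if_neg hmem] at hc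
        obtain ⟨j, h1, h2, h3, h4, h5⟩ := ih.1 c hc
        refine ⟨j, h1, by omega, h3, h4, fun k hk1 hk2 => ?_⟩
        rcases Nat.lt_or_ge k (i + 1) with h | h
        · exact h5 k hk1 (by omega)
        · have : k = i + 1 := by omega
          rw [this]; exact hmem
    · intro hnone j h1 h2
      by_cases hmem : pvCand qs (i + 1) ∈ pvCC
      · simp [pvFA, if_pos hmem] at hnone
      · simp only [pvFA, if_neg hmem] at hnone
        rcases Nat.lt_or_ge j (i + 1) with h | h
        · exact ih.2 hnone j h1 (by omega)
        · have : j = i + 1 := by omega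
          rw [this]; exact hmem

theorem fA_char (t : List Char) :
    (∀ c, pvFA (pvParts t) (pvParts t).length = some c →
        pvGood t c ∧ ∀ d, pvGood t d → d.length ≤ c.length) ∧
    (pvFA (pvParts t) (pvParts t).length = none → ∀ d, ¬ pvGood t d) := by
  have hqne : pvParts t ≠ [] := by simp [pvParts]
  have ht : pvJoinU (pvParts t) = t := parts_join t
  constructor
  · intro c hc
    obtain ⟨j, hj1, hj2, hceq, hmem, hno⟩ := (fA_scan (pvParts t) (pvParts t).length).1 c hc
    have hal : pvAligned c t := by
      rw [← ht, hceq]; exact aligned_cand (pvParts t) j hj1 hj2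
    refine ⟨⟨hmem, hal⟩, ?_⟩
    rintro d ⟨hdmem, hdal⟩
    obtain ⟨k, hk1, hk2, hdeq⟩ := cand_of_aligned d (pvParts t) hqne (parts_no_us t)
      (by rw [ht]; exact hdal)
    rcases Nat.lt_or_ge j k with h | h
    · exact absurd (hdeq ▸ hdmem) (hno k h hk2)
    · have hpre := cand_mono (pvParts t) k j h hj2
      rw [← hceq, ← hdeq] at hpre
      exact hpre.length_le
  · rintro hnone d ⟨hdmem, hdal⟩
    obtain ⟨k, hk1, hk2, hdeq⟩ := cand_of_aligned d (pvParts t) hqne (parts_no_us t)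
      (by rw [ht]; exact hdal)
    exact (fA_scan (pvParts t) (pvParts t).length).2 hnone k hk1 hk2 (hdeq ▸ hdmem)

-- ---- B's fold: characterization ----

theorem testB_iff (t c : List Char) : pvTestB t c = true ↔ pvAligned c t := by
  unfold pvTestB pvAligned
  rw [Bool.or_eq_true, beq_iff_eq, PySem.Chars.startswith_iff]
  constructor
  · rintro (h | h)
    · exact Or.inl h.symm
    · exact Or.inr h
  · rintro (h | h)
    · exact Or.inl h.symm
    · exact Or.inr h

def pvInv (t : List Char) (l : List (List Char)) (o : Option (List Char)) : Prop :=
  match o with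
  | none => ∀ c ∈ l, pvTestB t c = false
  | some b => b ∈ l ∧ pvTestB t b = true ∧ ∀ c ∈ l, pvTestB t c = true → c.length ≤ b.length

theorem stepB_inv {t : List Char} {l : List (List Char)} {acc : Option (List Char)} (c : List Char)
    (h : pvInv t l acc) : pvInv t (l ++ [c]) (pvStepB t acc c) := by
  by_cases ht : pvTestB t c = true
  · cases acc with
    | none =>
      simp only [pvStepB, if_pos ht]
      refine ⟨by simp, ht, ?_⟩
      intro d hd htd
      rcases List.mem_append.mp hd with h' | h'
      · exact absurd htd (by simp [h d h'])
      · simp at h'; subst h'; exact le_refl _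
    | some b =>
      obtain ⟨hb1, hb2, hb3⟩ := h
      simp only [pvStepB, if_pos ht]
      by_cases hlen : c.length > b.length
      · simp only [if_pos hlen]
        refine ⟨by simp, ht, ?_⟩
        intro d hd htd
        rcases List.mem_append.mp hd with h' | h'
        · exact le_trans (hb3 d h' htd) (by omega)
        · simp at h'; subst h'; exact le_refl _
      · simp only [if_neg hlen]
        refine ⟨List.mem_append_left _ hb1, hb2, ?_⟩
        intro d hd htd
        rcases List.mem_append.mp hd with h' | h'
        · exact hb3 d h' htd
        · simp at h'; subst h'; omega
  · have hf : pvTestB t c = false := by revert ht; cases pvTestB t c <;> simp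
    cases acc with
    | none =>
      simp only [pvStepB, hf, Bool.false_eq_true, if_false]
      intro d hd
      rcases List.mem_append.mp hd with h' | h'
      · exact h d h'
      · simp at h'; subst h'; exact hf
    | some b =>
      obtain ⟨hb1, hb2, hb3⟩ := h
      simp only [pvStepB, hf, Bool.false_eq_true, if_false]
      refine ⟨List.mem_append_left _ hb1, hb2, ?_⟩
      intro d hd htd
      rcases List.mem_append.mp hd with h' | h'
      · exact hb3 d h' htd
      · simp at h'; subst h'; rw [htd] at hf; cases hf

theorem foldB_inv (t : List Char) : ∀ (l₂ l₁ : List (List Char)) (acc : Option (List Char)),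
    pvInv t l₁ acc → pvInv t (l₁ ++ l₂) (List.foldl (pvStepB t) acc l₂) := by
  intro l₂
  induction l₂ with
  | nil => intro l₁ acc h; simpa using h
  | cons c cs ih =>
    intro l₁ acc h
    have := ih (l₁ ++ [c]) (pvStepB t acc c) (stepB_inv c h)
    simpa [List.append_assoc] using this

theorem fB_char (t : List Char) :
    (∀ c, List.foldl (pvStepB t) none pvCC = some c →
        pvGood t c ∧ ∀ d, pvGood t d → d.length ≤ c.length) ∧
    (List.foldl (pvStepB t) none pvCC = none → ∀ d, ¬ pvGood t d) := by
  have hinv : pvInv t pvCC (List.foldl (pvStepB t) none pvCC) := by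
    have := foldB_inv t pvCC [] none (by intro c hmem; cases hmem)
    simpa using this
  constructor
  · intro c hc
    rw [hc] at hinv
    obtain ⟨h1, h2, h3⟩ := hinv
    refine ⟨⟨h1, (testB_iff t c).mp h2⟩, ?_⟩
    rintro d ⟨hd1, hd2⟩
    exact h3 d hd1 ((testB_iff t d).mpr hd2)
  · intro hnone d
    rw [hnone] at hinv
    rintro ⟨hd1, hd2⟩
    have := hinv d hd1
    rw [(testB_iff t d).mpr hd2] at this
    cases this

-- ---- the two scans agree ----

theorem core_eq (t : List Char) :
    pvFA (pvParts t) (pvParts t).length = List.foldl (pvStepB t) none pvCC := by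
  obtain ⟨ha1, ha2⟩ := fA_char t
  obtain ⟨hb1, hb2⟩ := fB_char t
  cases hA : pvFA (pvParts t) (pvParts t).length with
  | none =>
    cases hB : List.foldl (pvStepB t) none pvCC with
    | none => rfl
    | some b => exact absurd (hb1 b hB).1 (ha2 hA b)
  | some a =>
    cases hB : List.foldl (pvStepB t) none pvCC with
    | none => exact absurd (ha1 a hA).1 (hb2 hB a)
    | some b =>
      obtain ⟨hga, hmaxa⟩ := ha1 a hA
      obtain ⟨hgb, hmaxb⟩ := hb1 b hB
      have : a = b := aligned_length_eq hga.2 hgb.2 (le_antisymm (hmaxb a hga) (hmaxa b hgb))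
      rw [this]

-- ---- bridges from the string-level ports to the char-level scans ----

theorem pyRange_desc (n : Nat) :
    PySem.List.pyRange ((n : Int)) 0 (-1) = (List.range n).map (fun k : Nat => (n : Int) - (k : Int)) := by
  unfold PySem.List.pyRange
  rw [if_neg (by norm_num : ¬((-1:Int) = 0)), if_neg (by norm_num : ¬((0:Int) < -1))]
  by_cases h3 : (0:Int) < n
  · rw [if_pos h3]
    have hc : ((n:Int) - 0 + -(-1) - 1) / -(-1) = n := by norm_num
    rw [hc, Int.toNat_natCast]
    show List.map (fun k : Nat => (n:Int) + -1 * (k:Int)) (List.range n) = _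
    apply List.map_congr_left
    intro k _
    ring
  · have h0 : n = 0 := by omega
    subst h0
    rw [if_neg h3]
    simp

theorem pyRange_desc_succ (n : Nat) :
    PySem.List.pyRange ((n + 1 : Nat) : Int) 0 (-1)
      = ((n + 1 : Nat) : Int) :: PySem.List.pyRange (n : Int) 0 (-1) := by
  rw [pyRange_desc, pyRange_desc, List.range_succ_eq_map]
  simp only [List.map_cons, List.map_map]
  refine List.cons_eq_cons.mpr ⟨by push_cast; omega, ?_⟩
  apply List.map_congr_left
  intro k _
  simp only [Function.comp_apply]
  push_cast
  omega

theorem canonSetA_eq : pvCanonSetA = PySem.Set.ofList pvCanonListB := rfl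

theorem memb_bridge (cand : List Char) :
    PySem.Set.contains pvCanonSetA (String.ofList cand) = decide (cand ∈ pvCC) := by
  rw [canonSetA_eq, PySem.Set.contains_eq_decide]
  apply decide_eq_decide.mpr
  rw [PySem.Set.mem_ofList]
  unfold pvCC
  constructor
  · intro h
    exact List.mem_map.mpr ⟨String.ofList cand, h, by rw [String.toList_ofList]⟩
  · intro h
    obtain ⟨s', hs', heq⟩ := List.mem_map.mp h
    have : String.ofList cand = s' := by rw [← heq, String.ofList_toList]
    rw [this]; exact hs'

theorem join_bridge (l : List (List Char)) :
    PySem.Str.join "_" (l.map String.ofList) = String.ofList (pvJoinU l) := by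
  unfold PySem.Str.join
  congr 1
  rw [List.map_map]
  have : String.toList ∘ String.ofList = id := by
    funext x; simp [String.toList_ofList]
  rw [this, List.map_id]
  have hsep : "_".toList = ['_'] := rfl
  rw [hsep, joinU_eq_join]

theorem loopA_bridge (qs : List (List Char)) : ∀ m : Nat, m ≤ qs.length →
    pvLoopA (qs.map String.ofList) (PySem.List.pyRange ((m : Nat) : Int) 0 (-1))
      = Option.map String.ofList (pvFA qs m) := by
  intro m
  induction m with
  | zero =>
    intro _
    have : PySem.List.pyRange ((0 : Nat) : Int) 0 (-1) = [] := by
      rw [pyRange_desc]; simp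
    rw [this]
    rfl
  | succ m ih =>
    intro hm
    rw [pyRange_desc_succ]
    show (let candidate := PySem.Str.join "_" (PySem.List.slice (qs.map String.ofList) none (some ((m + 1 : Nat) : Int)));
      if PySem.Set.contains pvCanonSetA candidate then some candidate
      else pvLoopA (qs.map String.ofList) (PySem.List.pyRange ((m : Nat) : Int) 0 (-1))) = _
    have hslice : PySem.List.slice (qs.map String.ofList) none (some ((m + 1 : Nat) : Int))
        = (qs.take (m + 1)).map String.ofList := by
      rw [PySem.List.slice_to _ (by positivity)]
      rw [Int.toNat_natCast, List.map_take]
    simp only [hslice, join_bridge, memb_bridge]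
    by_cases hmem : pvJoinU (qs.take (m + 1)) ∈ pvCC
    · simp only [hmem, decide_true, if_true]
      show _ = Option.map String.ofList (pvFA qs (m + 1))
      have : pvFA qs (m + 1) = some (pvCand qs (m + 1)) := by
        simp [pvFA, pvCand, hmem]
      rw [this]
      rfl
    · simp only [hmem, decide_false, Bool.false_eq_true, if_false]
      rw [ih (by omega)]
      have : pvFA qs (m + 1) = pvFA qs m := by
        simp [pvFA, pvCand, hmem]
      rw [this]

theorem bridgeA (s : String) :
    normalize_intent s
      = (Option.map String.ofList (pvFA (pvParts s.toList) (pvParts s.toList).length)).getD s := by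
  unfold normalize_intent
  have hsplit : (PySem.Str.split? s "_").getD [] = (pvParts s.toList).map String.ofList := by
    unfold PySem.Str.split?
    have : PySem.Chars.split? s.toList "_".toList = some (pvParts s.toList) := by
      unfold PySem.Chars.split?
      rw [if_neg (by simp [show "_".toList = ['_'] from rfl])]
      rw [show "_".toList = ['_'] from rfl, splitOn_us]
    rw [this]
    rfl
  rw [hsplit]
  show (pvLoopA (List.map String.ofList (pvParts s.toList))
      (PySem.List.pyRange (PySem.List.len (List.map String.ofList (pvParts s.toList))) 0 (-1))).getD s = _
  have hlen : PySem.List.len ((pvParts s.toList).map String.ofList)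
      = (((pvParts s.toList).length : Nat) : Int) := by
    simp [PySem.List.len_eq]
  rw [hlen, loopA_bridge (pvParts s.toList) (pvParts s.toList).length (le_refl _)]

theorem step_bridge (s : String) (acc : Option (List Char)) (c : String) :
    (if s == c || PySem.Str.startswith s (c ++ "_") then
        match Option.map String.ofList acc with
        | none => some c
        | some b => if PySem.Str.len c > PySem.Str.len b then some c else Option.map String.ofList acc
      else Option.map String.ofList acc)
      = Option.map String.ofList (pvStepB s.toList acc c.toList) := by
  have hcond : (s == c || PySem.Str.startswith s (c ++ "_")) = pvTestB s.toList c.toList := by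
    unfold pvTestB
    have h1 : (s == c) = (s.toList == c.toList) := by
      rw [Bool.eq_iff_iff]
      simp [String.toList_inj]
    have h2 : PySem.Str.startswith s (c ++ "_") = PySem.Chars.startswith s.toList (c.toList ++ ['_']) := by
      rw [show PySem.Str.startswith s (c ++ "_") = PySem.Chars.startswith s.toList (c ++ "_").toList from rfl]
      rw [String.toList_append]
      rfl
    rw [h1, h2]
  rw [hcond]
  unfold pvStepB
  by_cases ht : pvTestB s.toList c.toList = true
  · rw [if_pos ht, if_pos ht]
    cases acc with
    | none => simp
    | some b =>
      show (if PySem.Str.len c > PySem.Str.len (String.ofList b) then some c else some (String.ofList b))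
        = Option.map String.ofList (if c.toList.length > b.length then some c.toList else some b)
      have hl : (PySem.Str.len c > PySem.Str.len (String.ofList b)) ↔ (c.toList.length > b.length) := by
        simp [PySem.Str.len_eq, String.toList_ofList]
      by_cases hlen : c.toList.length > b.length
      · rw [if_pos (hl.mpr hlen), if_pos hlen]
        simp [String.ofList_toList]
      · rw [if_neg (fun hh => hlen (hl.mp hh)), if_neg hlen]
        rfl
  · rw [if_neg ht, if_neg ht]

theorem bridgeB (s : String) :
    normalize_intent_alt s
      = (Option.map String.ofList (List.foldl (pvStepB s.toList) none pvCC)).getD s := by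
  unfold normalize_intent_alt
  have main : ∀ (l : List String) (acc : Option (List Char)),
      List.foldl
        (fun best c =>
          if s == c || PySem.Str.startswith s (c ++ "_") then
            match best with
            | none => some c
            | some b => if PySem.Str.len c > PySem.Str.len b then some c else best
          else best)
        (Option.map String.ofList acc) l
      = Option.map String.ofList (List.foldl (pvStepB s.toList) acc (l.map String.toList)) := by
    intro l
    induction l with
    | nil => intro acc; simp
    | cons c cs ih =>
      intro acc
      simp only [List.foldl_cons, List.map_cons]
      rw [show (if s == c || PySem.Str.startswith s (c ++ "_") then
            match Option.map String.ofList acc with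
            | none => some c
            | some b => if PySem.Str.len c > PySem.Str.len b then some c else Option.map String.ofList acc
          else Option.map String.ofList acc) = Option.map String.ofList (pvStepB s.toList acc c.toList)
        from step_bridge s acc c]
      exact ih (pvStepB s.toList acc c.toList)
  have := main pvCanonListB none
  simp only [Option.map_none] at this
  rw [this]
  rfl

-- ===== VERDICT (by name: the statement is the Claim_ definition above) =====
theorem normalize_intent_spec : Claim_equal_normalize_intent := by
  intro s _
  unfold Spec_normalize_intent
  rw [bridgeA, bridgeB, core_eq]
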